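-- pv_equiv track=rewrite | github.com/amolkulkar/final-roborta-keyboard | src/dataset_eval.py | guess_text_col
-- ===== SOURCE A (Python) =====
-- CANDIDATE_TEXT_COLS = ["text","comment_text","tweet","content","message","clean_text","sentence"]
--
-- def guess_text_col(headers):
--     low = [h.lower() for h in headers]
--     for c in CANDIDATE_TEXT_COLS:
--         if c in low:
--             return headers[low.index(c)]
--     # fallback: first non-id-like column
--     for h in headers:
--         if h.lower() not in {"id","label","labels","target","toxic","toxicity"}:
--             return h
--     return headers[0]
-- ===== SOURCE B (Python) =====
-- CANDIDATE_TEXT_COLS = ["text","comment_text","tweet","content","message","clean_text","sentence"]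
--
-- def guess_text_col(headers):
--     # single pass over headers with a rank table, instead of candidate-outer nested scans
--     rank = {name: i for i, name in enumerate(CANDIDATE_TEXT_COLS)}
--     best = None
--     best_rank = len(CANDIDATE_TEXT_COLS)
--     for h in headers:
--         r = rank.get(h.lower(), len(CANDIDATE_TEXT_COLS))
--         if r < best_rank:
--             best = h
--             best_rank = r
--     if best is not None:
--         return best
--     # fallback: first non-id-like column
--     for h in headers:
--         if h.lower() not in {"id","label","labels","target","toxic","toxicity"}:
--             return h
--     return headers[0]
-- ===== Notes on version B (the rewrite author's own statement) =====
-- stated objective: alternative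
-- what changed: Replaced the candidate-outer nested scan (membership test plus list.index per candidate) by one single pass over headers that tracks the min-rank header via a precomputed rank table, with the same fallback.
-- outside the precondition, e.g. on guess_text_col([]): A raises IndexError, B raises IndexError
import Mathlib
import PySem

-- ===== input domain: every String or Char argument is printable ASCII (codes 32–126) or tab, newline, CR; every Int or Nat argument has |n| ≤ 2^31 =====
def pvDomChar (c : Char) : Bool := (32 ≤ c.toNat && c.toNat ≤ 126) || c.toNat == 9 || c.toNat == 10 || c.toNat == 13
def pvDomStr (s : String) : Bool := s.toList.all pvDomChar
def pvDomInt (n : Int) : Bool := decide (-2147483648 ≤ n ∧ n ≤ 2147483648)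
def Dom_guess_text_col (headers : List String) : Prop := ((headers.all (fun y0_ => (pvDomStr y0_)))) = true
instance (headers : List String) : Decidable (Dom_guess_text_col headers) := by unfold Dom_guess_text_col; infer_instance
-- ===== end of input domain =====

-- B inverts A's loop nesting: one pass over headers tracking the minimum-rank header via a rank table; same result, same cost class (objective: alternative).

def CANDIDATE_TEXT_COLS : List String :=
  ["text","comment_text","tweet","content","message","clean_text","sentence"]

def ID_LIKE : List String := ["id","label","labels","target","toxic","toxicity"]

-- ===== PORT A =====
-- for c in CANDIDATE_TEXT_COLS: if c in low: return headers[low.index(c)]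
def findCandA (cs low headers : List String) : Option String :=
  match cs with
  | [] => none
  | c :: rest =>
    if low.contains c then
      (PySem.List.index? low c).bind (fun i => PySem.List.pyGet? headers (i : Int))
    else findCandA rest low headers

-- fallback loop: first h with h.lower() not in the id-like set (membership in a literal set = list membership)
def fallbackA (headers : List String) : Option String :=
  match headers with
  | [] => none
  | h :: t => if ID_LIKE.contains (PySem.Str.lower h) then fallbackA t else some h

def guess_text_col (headers : List String) : String :=
  let low := headers.map PySem.Str.lower
  match findCandA CANDIDATE_TEXT_COLS low headers with
  | some s => s
  | none =>
    match fallbackA headers with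
    | some s => s
    | none => (PySem.List.pyGet? headers 0).getD ""   -- headers[0]; [] raises, excluded by Pre_

-- ===== PORT B =====
-- rank = {name: i for i, name in enumerate(CANDIDATE_TEXT_COLS)}
def rankDict : PySem.Dict String Int :=
  (PySem.List.enumerate CANDIDATE_TEXT_COLS 0).foldl (fun d p => d.insert p.2 (p.1 : Int)) PySem.Dict.empty

-- for h in headers: r = rank.get(h.lower(), len); if r < best_rank: best, best_rank = h, r
def loopB (headers : List String) (best : Option String) (bestRank : Int) : Option String × Int :=
  match headers with
  | [] => (best, bestRank)
  | h :: t =>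
    let r := rankDict.getD (PySem.Str.lower h) (CANDIDATE_TEXT_COLS.length : Int)
    if r < bestRank then loopB t (some h) r else loopB t best bestRank

def fallbackB (headers : List String) : Option String :=
  match headers with
  | [] => none
  | h :: t => if ID_LIKE.contains (PySem.Str.lower h) then fallbackB t else some h

def guess_text_col_alt (headers : List String) : String :=
  match (loopB headers none (CANDIDATE_TEXT_COLS.length : Int)).1 with
  | some s => s
  | none =>
    match fallbackB headers with
    | some s => s
    | none => (PySem.List.pyGet? headers 0).getD ""

-- ===== PRECONDITION & SPEC =====
-- A raises IndexError at headers = [] (headers[0] in the final return); Pre_ excludes only that input.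
def Pre_guess_text_col (headers : List String) : Prop := headers ≠ []
instance (headers : List String) : Decidable (Pre_guess_text_col headers) := by
  unfold Pre_guess_text_col; infer_instance
def pvWitness_guess_text_col : List String := ["id", "Tweet"]

def Spec_guess_text_col (headers : List String) (out : String) : Prop := out = guess_text_col_alt headers
instance (headers : List String) (out : String) : Decidable (Spec_guess_text_col headers out) := by unfold Spec_guess_text_col; infer_instance

-- ===== CLAIM (what is proved, stated in full; the proofs are below) =====
def Claim_equal_guess_text_col : Prop := ∀ (headers : List String), Dom_guess_text_col headers → Pre_guess_text_col headers → Spec_guess_text_col headers (guess_text_col headers)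

-- ===== LEMMAS AND PROOFS =====

-- reference: first header achieving the strictly-smallest rank below k, rank taken w.r.t. candidate list cs
def mrh (rk : String → Int) (headers : List String) (k : Int) : Option String :=
  match headers with
  | [] => none
  | h :: t => if rk h < k then some ((mrh rk t (rk h)).getD h) else mrh rk t k

def rkOf (cs : List String) (h : String) : Int := (cs.idxOf (PySem.Str.lower h) : Int)

theorem rankDict_getD (s : String) :
    rankDict.getD s (CANDIDATE_TEXT_COLS.length : Int) = (CANDIDATE_TEXT_COLS.idxOf s : Int) := by
  simp only [rankDict, CANDIDATE_TEXT_COLS, PySem.List.enumerate]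
  simp [PySem.Dict.getD, PySem.Dict.get?, PySem.Dict.insert, PySem.Dict.empty, List.idxOf,
    List.findIdx, List.findIdx.go, List.find?]
  (repeat' split) <;> simp_all [Bool.cond_eq_ite, beq_iff_eq]

theorem rkOf_nonneg (cs : List String) (h : String) : 0 ≤ rkOf cs h := by
  simp [rkOf]

theorem loopB_eq_mrh (headers : List String) (best : Option String) (k : Int) :
    (loopB headers best k).1 = ((mrh (rkOf CANDIDATE_TEXT_COLS) headers k).or best) := by
  induction headers generalizing best k with
  | nil => simp [loopB, mrh]
  | cons h t ih =>
    simp only [loopB, mrh, rankDict_getD]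
    by_cases hlt : rkOf CANDIDATE_TEXT_COLS h < k
    · simp only [rkOf] at hlt
      rw [if_pos hlt, if_pos (by simpa [rkOf] using hlt), ih]
      simp only [rkOf]
      cases mrh (rkOf CANDIDATE_TEXT_COLS) t ((CANDIDATE_TEXT_COLS.idxOf (PySem.Str.lower h) : Int)) <;>
        simp
    · simp only [rkOf] at hlt
      rw [if_neg hlt, if_neg (by simpa [rkOf] using hlt), ih]

theorem mrh_zero_le (rk : String → Int) (hnn : ∀ h, 0 ≤ rk h) (headers : List String) (k : Int)
    (hk : k ≤ 0) : mrh rk headers k = none := by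
  induction headers with
  | nil => rfl
  | cons h t ih =>
    have := hnn h
    simp only [mrh]
    rw [if_neg (by omega)]
    exact ih

theorem rkOf_cons_eq (c : String) (cs' : List String) (h : String) (hc : PySem.Str.lower h = c) :
    rkOf (c :: cs') h = 0 := by
  simp [rkOf, hc]

theorem rkOf_cons_ne (c : String) (cs' : List String) (h : String) (hc : ¬ PySem.Str.lower h = c) :
    rkOf (c :: cs') h = rkOf cs' h + 1 := by
  have hb : (c == PySem.Str.lower h) = false := by
    simp only [beq_eq_false_iff_ne, ne_eq]
    exact fun he => hc he.symm
  simp only [rkOf, List.idxOf_cons, hb, cond_false]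
  push_cast; ring

theorem mrh_present (c : String) (cs' headers : List String) (k : Int) (hk : 1 ≤ k)
    (hmem : c ∈ headers.map PySem.Str.lower) :
    mrh (rkOf (c :: cs')) headers k = headers.find? (fun h => PySem.Str.lower h == c) := by
  induction headers generalizing k with
  | nil => simp at hmem
  | cons h t ih =>
    by_cases hc : PySem.Str.lower h = c
    · simp only [mrh, rkOf_cons_eq c cs' h hc]
      rw [if_pos (by omega),
        mrh_zero_le _ (rkOf_nonneg (c :: cs')) t 0 le_rfl]
      simp [List.find?, hc]
    · have hmem' : c ∈ t.map PySem.Str.lower := by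
        rcases (List.mem_map.mp hmem) with ⟨x, hx, hlx⟩
        rcases List.mem_cons.mp hx with hx | hx
        · subst hx; exact absurd hlx hc
        · exact List.mem_map.mpr ⟨x, hx, hlx⟩
      have hfind : ∃ y, t.find? (fun h => PySem.Str.lower h == c) = some y := by
        rcases (List.mem_map.mp hmem') with ⟨x, hx, hlx⟩
        have : (t.find? (fun h => PySem.Str.lower h == c)).isSome :=
          List.find?_isSome.mpr ⟨x, hx, by simp [hlx]⟩
        exact Option.isSome_iff_exists.mp this
      rcases hfind with ⟨y, hy⟩
      have hrk := rkOf_cons_ne c cs' h hc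
      have hnn := rkOf_nonneg cs' h
      have hb : (PySem.Str.lower h == c) = false := by
        simpa [beq_eq_false_iff_ne, ne_eq] using hc
      simp only [mrh, hrk]
      by_cases hlt : rkOf cs' h + 1 < k
      · rw [if_pos hlt, ih (rkOf cs' h + 1) (by omega) hmem', hy]
        simp [List.find?, hb, hy]
      · rw [if_neg hlt, ih k hk hmem']
        simp [List.find?, hb]

theorem mrh_absent (c : String) (cs' headers : List String) (k : Int)
    (hmem : c ∉ headers.map PySem.Str.lower) :
    mrh (rkOf (c :: cs')) headers k = mrh (rkOf cs') headers (k - 1) := by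
  induction headers generalizing k with
  | nil => rfl
  | cons h t ih =>
    have hc : ¬ PySem.Str.lower h = c := by
      intro he; exact hmem (List.mem_map.mpr ⟨h, List.mem_cons_self .., he⟩)
    have hmem' : c ∉ t.map PySem.Str.lower := by
      intro hm; exact hmem (by simpa using Or.inr (List.mem_map.mp hm))
    have hrk := rkOf_cons_ne c cs' h hc
    simp only [mrh, hrk]
    by_cases hlt : rkOf cs' h + 1 < k
    · rw [if_pos hlt, if_pos (by omega), ih (rkOf cs' h + 1) hmem']
      simp
    · rw [if_neg hlt, if_neg (by omega), ih k hmem']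

theorem index_bind_get (headers : List String) (c : String)
    (hmem : c ∈ headers.map PySem.Str.lower) :
    (PySem.List.index? (headers.map PySem.Str.lower) c).bind
      (fun i => PySem.List.pyGet? headers (i : Int))
      = headers.find? (fun h => PySem.Str.lower h == c) := by
  induction headers with
  | nil => simp at hmem
  | cons h t ih =>
    by_cases hc : PySem.Str.lower h = c
    · rw [List.map_cons, hc, PySem.List.index?_cons_self]
      simp [List.find?, hc]
    · have hmem' : c ∈ t.map PySem.Str.lower := by
        rcases (List.mem_map.mp hmem) with ⟨x, hx, hlx⟩
        rcases List.mem_cons.mp hx with hx | hx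
        · subst hx; exact absurd hlx hc
        · exact List.mem_map.mpr ⟨x, hx, hlx⟩
      rw [List.map_cons, PySem.List.index?_cons_of_ne _ hc]
      rw [Option.bind_map]
      have : ∀ i : Nat, PySem.List.pyGet? (h :: t) ((i + 1 : Nat) : Int) =
          PySem.List.pyGet? t (i : Int) := by
        intro i
        rw [show ((i + 1 : Nat) : Int) = (i : Int) + 1 by push_cast; ring,
          PySem.List.pyGet?_cons_succ]
      simp only [Function.comp, this]
      rw [ih hmem']
      have hb : (PySem.Str.lower h == c) = false := by
        simpa [beq_eq_false_iff_ne, ne_eq] using hc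
      simp [List.find?, hb]

theorem findCandA_eq_mrh (cs headers : List String) :
    findCandA cs (headers.map PySem.Str.lower) headers = mrh (rkOf cs) headers (cs.length : Int) := by
  induction cs with
  | nil =>
    rw [mrh_zero_le _ (rkOf_nonneg []) headers _ (by simp)]
    rfl
  | cons c rest ih =>
    simp only [findCandA]
    by_cases hmem : c ∈ headers.map PySem.Str.lower
    · rw [if_pos (by simpa using hmem), index_bind_get headers c hmem,
        mrh_present c rest headers _ (by exact_mod_cast Nat.succ_le_succ (Nat.zero_le _)) hmem]
    · rw [if_neg (by simpa using hmem), ih, mrh_absent c rest headers _ hmem]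
      norm_num

theorem fallback_eq (headers : List String) : fallbackB headers = fallbackA headers := by
  induction headers with
  | nil => rfl
  | cons h t ih => simp [fallbackA, fallbackB, ih]

-- ===== VERDICT (by name: the statement is the Claim_ definition above) =====
theorem guess_text_col_spec : Claim_equal_guess_text_col := by
  intro headers _ _
  show _ = _
  simp only [guess_text_col, guess_text_col_alt, loopB_eq_mrh, findCandA_eq_mrh, fallback_eq,
    Option.or_none]
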